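-- pv_equiv track=rewrite | github.com/musaprg/KyoPro | atcoder/abc121/C/main.py | solve
-- ===== SOURCE A (Python) =====
-- def solve(m,ab):
--     ans = 0
--     for n in ab:
--         if m == 0:
--             break
--         c = min(m,n[1])
--         m -= c
--         ans += c * n[0]
--     return ans
-- ===== SOURCE B (Python) =====
-- def solve(m, ab):
--     if m == 0:
--         return 0
--     # cumulative quantities
--     prefix = []
--     t = 0
--     for _, b in ab:
--         t += b
--         prefix.append(t)
--     # first index whose cumulative quantity reaches m
--     k = next((i for i, p in enumerate(prefix) if p >= m), None)
--     if k is None: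
--         return sum(a * b for a, b in ab)
--     before = prefix[k - 1] if k > 0 else 0
--     return sum(a * b for a, b in ab[:k]) + ab[k][0] * (m - before)
-- ===== Notes on version B (the rewrite author's own statement) =====
-- stated objective: alternative
-- what changed: Replaces A's single stateful loop (decrementing the remaining demand with min) by a prefix-sum table of quantities, a search for the first boundary index whose cumulative quantity reaches m, and a sum of full items before the boundary plus one partial-purchase term.
import Mathlib
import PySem

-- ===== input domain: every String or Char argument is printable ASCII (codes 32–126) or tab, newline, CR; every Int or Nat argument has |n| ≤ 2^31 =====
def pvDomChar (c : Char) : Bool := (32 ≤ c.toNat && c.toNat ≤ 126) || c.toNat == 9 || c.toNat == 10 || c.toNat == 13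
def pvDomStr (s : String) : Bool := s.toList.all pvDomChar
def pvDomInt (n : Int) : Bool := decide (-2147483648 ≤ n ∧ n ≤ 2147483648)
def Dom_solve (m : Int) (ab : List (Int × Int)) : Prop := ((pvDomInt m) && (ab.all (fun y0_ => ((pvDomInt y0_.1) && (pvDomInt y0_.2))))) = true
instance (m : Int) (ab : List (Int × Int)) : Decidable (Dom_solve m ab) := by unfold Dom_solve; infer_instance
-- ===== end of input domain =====

-- B replaces A's single min-decrement loop by a prefix-sum table plus a boundary search (alternative decomposition, same cost).

-- ===== PORT A =====
-- literal port of A's loop: state (m, ans), break when m == 0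
def solveGo (m : Int) (ans : Int) : List (Int × Int) → Int
  | [] => ans
  | n :: rest =>
    if m = 0 then ans
    else
      let c := min m n.2
      solveGo (m - c) (ans + c * n.1) rest

def solve (m : Int) (ab : List (Int × Int)) : Int := solveGo m 0 ab

-- ===== PORT B =====
-- Source B's prefix list of cumulative quantities, built with accumulator t
def prefixSums (t : Int) : List (Int × Int) → List Int
  | [] => []
  | p :: rest => (t + p.2) :: prefixSums (t + p.2) rest

-- Source B's: first index i with prefix[i] >= m
def findBoundary (m : Int) (pre : List Int) : Option Nat :=
  pre.findIdx? (fun p => m ≤ p)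

-- sum(a * b for a, b in l)
def sumAB (l : List (Int × Int)) : Int := (l.map (fun p => p.1 * p.2)).sum

def solve_alt (m : Int) (ab : List (Int × Int)) : Int :=
  if m = 0 then 0
  else
    let pre := prefixSums 0 ab
    match findBoundary m pre with
    | none => sumAB ab
    | some k =>
      let before := if 0 < k then pre.getD (k - 1) 0 else 0
      sumAB (ab.take k) + (ab.getD k (0, 0)).1 * (m - before)

-- ===== PRECONDITION & SPEC =====
def Spec_solve (m : Int) (ab : List (Int × Int)) (out : Int) : Prop := out = solve_alt m ab
instance (m : Int) (ab : List (Int × Int)) (out : Int) : Decidable (Spec_solve m ab out) := by unfold Spec_solve; infer_instance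

-- ===== CLAIM (what is proved, stated in full; the proofs are below) =====
def Claim_equal_solve : Prop := ∀ (m : Int) (ab : List (Int × Int)), Dom_solve m ab → Spec_solve m ab (solve m ab)

-- ===== LEMMAS AND PROOFS =====

theorem solveGo_ans (l : List (Int × Int)) : ∀ m ans, solveGo m ans l = ans + solveGo m 0 l := by
  induction l with
  | nil => intro m ans; simp [solveGo]
  | cons p rest ih =>
    intro m ans
    by_cases h : m = 0
    · simp [solveGo, h]
    · simp only [solveGo, if_neg h]
      rw [ih, ih (m - min m p.2) (0 + min m p.2 * p.1)]
      ring

theorem prefixSums_shift (l : List (Int × Int)) : ∀ t, prefixSums t l = (prefixSums 0 l).map (t + ·) := by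
  induction l with
  | nil => intro t; simp [prefixSums]
  | cons p rest ih =>
    intro t
    simp only [prefixSums, List.map_cons, zero_add]
    congr 1
    rw [ih (t + p.2), ih p.2, List.map_map]
    apply List.map_congr_left
    intro x _
    simp only [Function.comp_apply]
    ring

theorem findIdx?_map_shift (l : List Int) (m s : Int) :
    List.findIdx? (fun p => decide (m ≤ p)) (l.map (s + ·)) =
      List.findIdx? (fun p => decide ((m - s) ≤ p)) l := by
  induction l with
  | nil => simp
  | cons x rest ih =>
    simp only [List.map_cons, List.findIdx?_cons]
    have hd : (decide (m ≤ s + x)) = (decide (m - s ≤ x)) := by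
      by_cases h : m ≤ s + x
      · rw [decide_eq_true h, decide_eq_true (show m - s ≤ x by omega)]
      · rw [decide_eq_false h, decide_eq_false (show ¬ m - s ≤ x by omega)]
    rw [hd, ih]

theorem getD_map_shift (l : List Int) (s : Int) (i : Nat) (hi : i < l.length) :
    (l.map (s + ·)).getD i 0 = s + l.getD i 0 := by
  rw [List.getD_eq_getElem?_getD, List.getD_eq_getElem?_getD]
  simp [hi]

theorem solveGo_zero (l : List (Int × Int)) : solveGo 0 0 l = 0 := by
  cases l <;> simp [solveGo]

theorem sumAB_cons (p : Int × Int) (l : List (Int × Int)) :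
    sumAB (p :: l) = p.1 * p.2 + sumAB l := by
  simp [sumAB]

-- B's value when the very first item covers the demand
theorem alt_hit (m : Int) (p : Int × Int) (rest : List (Int × Int))
    (h : m ≠ 0) (hle : m ≤ p.2) : solve_alt m (p :: rest) = m * p.1 := by
  simp only [solve_alt, if_neg h, prefixSums, zero_add, findBoundary, List.findIdx?_cons,
    decide_eq_true hle]
  simp [sumAB]
  ring

-- B's value when the first item is bought whole
theorem alt_cons (m : Int) (p : Int × Int) (rest : List (Int × Int))
    (h : m ≠ 0) (hgt : p.2 < m) :
    solve_alt m (p :: rest) = p.2 * p.1 + solve_alt (m - p.2) rest := by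
  have hle : ¬ m ≤ p.2 := not_le.mpr hgt
  have hm' : ¬ (m - p.2 = 0) := by omega
  simp only [solve_alt, if_neg h, if_neg hm', prefixSums, zero_add, findBoundary,
    List.findIdx?_cons, decide_eq_false hle, if_neg (by simp : ¬ (false = true)),
    prefixSums_shift rest p.2, findIdx?_map_shift]
  cases hfi : List.findIdx? (fun q => decide (m - p.2 ≤ q)) (prefixSums 0 rest) with
  | none =>
    simp [sumAB_cons]; ring
  | some j =>
    have hjlt : j < (prefixSums 0 rest).length :=
      (List.findIdx?_eq_some_iff_findIdx_eq.mp hfi).1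
    simp only [Option.map_some]
    cases j with
    | zero =>
      simp only [Nat.zero_add, if_pos Nat.zero_lt_one, if_neg (lt_irrefl 0),
        Nat.sub_self, List.getD_cons_zero, List.take_succ_cons, List.take_zero,
        List.getD_cons_succ]
      simp [sumAB]
      ring
    | succ i =>
      have hilt : i < (prefixSums 0 rest).length := Nat.lt_of_succ_lt hjlt
      simp only [if_pos (Nat.succ_pos _),
        Nat.succ_sub_one, List.getD_cons_succ, List.take_succ_cons]
      rw [getD_map_shift _ _ _ hilt, sumAB_cons]
      ring

theorem solve_eq_alt (ab : List (Int × Int)) : ∀ m, solve m ab = solve_alt m ab := by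
  induction ab with
  | nil =>
    intro m
    by_cases h : m = 0 <;> simp [solve, solveGo, solve_alt, h, findBoundary, prefixSums, sumAB]
  | cons p rest ih =>
    intro m
    by_cases h : m = 0
    · simp [solve, solveGo, solve_alt, h]
    · simp only [solve, solveGo, if_neg h]
      rw [solveGo_ans]
      by_cases hle : m ≤ p.2
      · rw [min_eq_left hle]
        simp only [sub_self, solveGo_zero]
        rw [alt_hit m p rest h hle]
        ring
      · have hgt : p.2 < m := not_le.mp hle
        rw [min_eq_right (le_of_lt hgt)]
        rw [show solveGo (m - p.2) 0 rest = solve_alt (m - p.2) rest from ih (m - p.2)]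
        rw [alt_cons m p rest h hgt]
        ring

-- ===== VERDICT (by name: the statement is the Claim_ definition above) =====
theorem solve_spec : Claim_equal_solve := by
  intro m ab _
  unfold Spec_solve
  exact solve_eq_alt ab m
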